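-- pv_equiv track=rewrite | github.com/csjas/comp110-23s-workspace | exercises/ex08/data_utils.py | count_further
-- ===== SOURCE A (Python) =====
-- def count_further(number: list[str]) -> dict[str, int]:
--     """Generate a dictionary where a string is used as the key and an integer is used as the corresponding value."""
--     different: dict[str, int] = {}
--     for stringing in number:
--         if stringing in different:
--             different[stringing] += 1
--         else:
--             different[stringing] = 1
--     return different
-- ===== SOURCE B (Python) =====
-- def count_further(number: list[str]) -> dict[str, int]:
--     """Generate a dictionary where a string is used as the key and an integer is used as the corresponding value."""
--     if not number:
--         return {}
--     if len(number) == 1: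
--         return {number[0]: 1}
--     mid = len(number) // 2
--     counts = count_further(number[:mid])
--     for s, c in count_further(number[mid:]).items():
--         counts[s] = counts.get(s, 0) + c
--     return counts
-- ===== Notes on version B (the rewrite author's own statement) =====
-- stated objective: alternative
-- what changed: B replaces A's single-pass membership-test/increment loop by divide and conquer: it recursively counts the two halves of the list and merges the two count dicts, preserving first-occurrence key order.
import Mathlib
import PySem

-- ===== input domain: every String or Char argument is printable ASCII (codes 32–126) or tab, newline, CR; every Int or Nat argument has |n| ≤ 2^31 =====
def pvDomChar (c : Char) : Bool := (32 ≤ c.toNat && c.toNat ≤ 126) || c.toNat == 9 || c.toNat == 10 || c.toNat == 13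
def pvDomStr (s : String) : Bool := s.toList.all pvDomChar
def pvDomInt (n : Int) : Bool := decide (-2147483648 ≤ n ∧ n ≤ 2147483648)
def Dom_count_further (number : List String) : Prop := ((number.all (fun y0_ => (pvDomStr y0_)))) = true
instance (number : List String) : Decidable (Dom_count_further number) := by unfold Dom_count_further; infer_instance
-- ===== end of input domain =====

-- B replaces A's membership-test counter loop by divide and conquer: count the two halves recursively and merge the dicts (alternative algorithm; same return value).


-- ===== PORT A =====
-- for stringing in number: if stringing in different: different[stringing] += 1 else: different[stringing] = 1
def count_further (number : List String) : List (String × Int) :=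
  (number.foldl
    (fun different stringing =>
      if different.contains stringing then
        different.insert stringing (different.getD stringing 0 + 1)
      else
        different.insert stringing 1)
    PySem.Dict.empty).items

-- ===== PORT B =====
-- if not number: return {}; if len(number) == 1: return {number[0]: 1}
-- mid = len(number)//2; counts = count_further(number[:mid])
-- for s, c in count_further(number[mid:]).items(): counts[s] = counts.get(s, 0) + c
-- (number[:mid] / number[mid:] are List.take / List.drop — exact, since 0 ≤ mid ≤ len)
def cfGo (number : List String) : PySem.Dict String Int :=
  if number.length = 0 then PySem.Dict.empty
  else if _h1 : number.length = 1 then PySem.Dict.empty.insert (number.headD "") 1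
  else
    let mid := number.length / 2
    let counts := cfGo (number.take mid)
    (cfGo (number.drop mid)).items.foldl
      (fun d p => d.insert p.1 (d.getD p.1 0 + p.2)) counts
termination_by number.length
decreasing_by
  · simp [List.length_take]; omega
  · simp; omega

def count_further_alt (number : List String) : List (String × Int) :=
  (cfGo number).items

-- ===== PRECONDITION & SPEC =====
def Spec_count_further (number : List String) (out : List (String × Int)) : Prop := out = count_further_alt number
instance (number : List String) (out : List (String × Int)) : Decidable (Spec_count_further number out) := by unfold Spec_count_further; infer_instance

-- ===== CLAIM =====
def Claim_equal_count_further : Prop := ∀ (number : List String), Dom_count_further number → Spec_count_further number (count_further number)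

-- ===== LEMMAS AND PROOFS =====

-- A's loop body collapses: inserting 1 at an absent key is inserting getD+1 there.
theorem count_further_step (d : PySem.Dict String Int) (s : String) :
    (if d.contains s then d.insert s (d.getD s 0 + 1) else d.insert s 1)
      = d.insert s (d.getD s 0 + 1) := by
  by_cases h : d.contains s = true
  · simp [h]
  · have h' : d.contains s = false := by simpa using h
    simp [h', PySem.Dict.getD_of_not_contains (d := d) (k := s) (d0 := (0:Int)) h']

-- getD after B's merge loop: base value plus the summed counts carried at key k.
theorem getD_merge (ps : List (String × Int)) (d : PySem.Dict String Int) (k : String) :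
    (ps.foldl (fun d p => d.insert p.1 (d.getD p.1 0 + p.2)) d).getD k 0
      = d.getD k 0 + ((ps.filter (fun p => p.1 == k)).map (·.2)).sum := by
  induction ps generalizing d with
  | nil => simp
  | cons p ps ih =>
    simp only [List.foldl_cons, ih, List.filter_cons]
    by_cases h : p.1 = k
    · rw [if_pos (by simp [h])]
      simp only [List.map_cons, List.sum_cons]
      rw [← h, PySem.Dict.getD_insert_self]
      ring
    · have hk : k ≠ p.1 := Ne.symm h
      rw [if_neg (by simp [h]), PySem.Dict.getD_insert, if_neg hk]

-- the summed counts at k of a keyed map: count of k times the carried value.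
theorem sum_filter_map_key (s : List String) (f : String → Int) (k : String) :
    (((s.map (fun j => (j, f j))).filter (fun p => p.1 == k)).map (·.2)).sum
      = (s.count k : Int) * f k := by
  induction s with
  | nil => simp
  | cons j s ih =>
    simp only [List.map_cons, List.filter_cons]
    by_cases h : j = k
    · subst h
      rw [if_pos (by simp)]
      simp only [List.map_cons, List.sum_cons, List.count_cons_self]
      rw [ih]; push_cast; ring
    · rw [if_neg (by simp [h]), ih]
      have hc : (j :: s).count k = s.count k := by simp [h]
      rw [hc]

-- Set.update with a deduplicated right argument is update with the raw list.
theorem update_ofList (s : List String) (xs : List String) :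
    PySem.Set.update s (PySem.Set.ofList xs) = PySem.Set.update s xs := by
  rw [PySem.Set.update_eq_append_filter, PySem.Set.update_eq_append_filter,
    PySem.Set.ofList_ofList]

-- merging Counter(r) into Counter(l) yields Counter(l ++ r).
theorem merge_counter (l r : List String) :
    (PySem.Dict.counter r).items.foldl
        (fun d p => d.insert p.1 (d.getD p.1 0 + p.2)) (PySem.Dict.counter l)
      = PySem.Dict.counter (l ++ r) := by
  apply PySem.Dict.ext
  have hkeys : ((PySem.Dict.counter r).items.foldl
      (fun d p => d.insert p.1 (d.getD p.1 0 + p.2)) (PySem.Dict.counter l)).keys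
      = PySem.Set.ofList (l ++ r) := by
    rw [PySem.Dict.keys_foldl_insert_key (PySem.Dict.counter r).items (fun p => p.1)
          (fun d p => d.getD p.1 0 + p.2) (PySem.Dict.counter l)]
    have : (PySem.Dict.counter r).items.map (fun p => p.1) = (PySem.Dict.counter r).keys := rfl
    rw [this, PySem.Dict.keys_counter, PySem.Dict.keys_counter, update_ofList,
      PySem.Set.ofList_append]
  have hnd : ((PySem.Dict.counter r).items.foldl
      (fun d p => d.insert p.1 (d.getD p.1 0 + p.2)) (PySem.Dict.counter l)).keys.Nodup := by
    rw [hkeys]; exact PySem.Set.nodup_ofList _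
  conv_rhs => rw [PySem.Dict.items_counter]
  rw [PySem.Dict.items_eq_map_keys _ hnd (0 : Int), hkeys]
  refine List.map_congr_left (fun k hk => ?_)
  have hget : ((PySem.Dict.counter r).items.foldl
      (fun d p => d.insert p.1 (d.getD p.1 0 + p.2)) (PySem.Dict.counter l)).getD k 0
      = ((l ++ r).count k : Int) := by
    rw [getD_merge, PySem.Dict.items_counter, sum_filter_map_key, PySem.Dict.getD_counter]
    by_cases hm : k ∈ r
    · have h1 : (PySem.Set.ofList r).count k = 1 := by
        refine List.count_eq_one_of_mem (PySem.Set.nodup_ofList r) ?_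
        exact (PySem.Set.mem_ofList r k).2 hm
      rw [h1, List.count_append]; push_cast; ring
    · have h0 : r.count k = 0 := List.count_eq_zero.2 hm
      have h0' : (PySem.Set.ofList r).count k = 0 := by
        refine List.count_eq_zero.2 (fun hc => hm ((PySem.Set.mem_ofList r k).1 hc))
      rw [h0, h0', List.count_append, h0]; push_cast; ring
  rw [hget]

-- the divide-and-conquer counter computes Counter(number).
theorem cfGo_eq (number : List String) : cfGo number = PySem.Dict.counter number := by
  induction hn : number.length using Nat.strong_induction_on generalizing number with
  | _ n ih =>
  rw [cfGo]
  by_cases h0 : number.length = 0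
  · rw [List.length_eq_zero_iff.1 h0]; simp [PySem.Dict.counter]
  · by_cases h1 : number.length = 1
    · obtain ⟨x, hx⟩ := List.length_eq_one_iff.1 h1
      subst hx
      simp only [h1, dif_pos]
      apply PySem.Dict.ext
      rw [PySem.Dict.items_counter]
      simp [PySem.Dict.items_insert, PySem.Dict.empty, PySem.Set.ofList, PySem.Set.add]
    · simp only [h0, h1, if_false, dif_neg, not_false_iff]
      have hlt1 : (number.take (number.length / 2)).length < n := by
        simp [List.length_take]; omega
      have hlt2 : (number.drop (number.length / 2)).length < n := by
        simp; omega
      rw [ih _ hlt1 _ rfl, ih _ hlt2 _ rfl, merge_counter, List.take_append_drop]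

-- ===== VERDICT =====
theorem count_further_spec : Claim_equal_count_further := by
  intro number _
  show count_further number = count_further_alt number
  unfold count_further count_further_alt
  have hf : (fun (d : PySem.Dict String Int) (s : String) =>
      if d.contains s then d.insert s (d.getD s 0 + 1) else d.insert s 1)
      = (fun d s => d.insert s (d.getD s 0 + 1)) := by
    funext d s; exact count_further_step d s
  rw [hf, PySem.Dict.foldl_insert_getD_add_one_eq_counter, cfGo_eq]
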